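-- pv_equiv track=rewrite | github.com/TeddyTeddy/Complete-Python-3-Bootcamp | 03-Methods and Functions/SummerOf69-MyVersion.py | get_nine_ranges
-- ===== SOURCE A (Python) =====
-- def get_nine_ranges(six_indexes, length_int_list):
--     """
--     Given int_list = [1,2,3,6,7,9,5,6,3,9,9,4]
--     we have length_int_list = 11
--     we have six_indexes = [3,7] (i.e. indexes of value 6 in int_list)
--     we have nine_indexes = [5,9,10] (i.e. indexes of value 9 in int_list)
--     This function returns result = [(3,(4,6)), (7,(8,11))]
--     [4,6] and [8,11] refer to possible index ranges to look for in nine_indexes;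
--     3 in (3,(4,6)) is 6's index
--     7 in (7,(8,11)) is 6's index
--     """
--     result = []
--     for i, six_index in enumerate(six_indexes):  # [(0,3), (1,7)]
--         tup = ()
--         if (i+1) < len(six_indexes):  # we have not reached the end of six_indexes yet
--             tup = (six_index, (six_index+1, six_indexes[i+1]-1))  # (3, (4,6))
--         else:  # if we reached the end of six_indexes list
--             tup = (six_index, (six_index + 1, length_int_list-1))         # (7,(8,11))
--         result.append(tup)
--     return result  # [(3,(4,6)), (7,(8,11))]
-- ===== SOURCE B (Python) =====
-- def get_nine_ranges(six_indexes, length_int_list):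
--     # Traverse the six indexes BACK-TO-FRONT, carrying the upper boundary as an
--     # accumulator: the boundary of the last six index is the list length, and
--     # each earlier index is bounded by the index processed just after it.
--     # This removes both the lookahead branch and any indexed access.
--     result = []
--     bound = length_int_list
--     for s in reversed(six_indexes):
--         result.append((s, (s + 1, bound - 1)))
--         bound = s
--     result.reverse()
--     return result
-- ===== Notes on version B (the rewrite author's own statement) =====
-- stated objective: alternative
-- what changed: Replaces the forward enumerate loop with a lookahead conditional and indexed access by a reversed traversal that carries the upper boundary as an accumulator (seeded with the list length) and reverses the output list at the end.
import Mathlib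
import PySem

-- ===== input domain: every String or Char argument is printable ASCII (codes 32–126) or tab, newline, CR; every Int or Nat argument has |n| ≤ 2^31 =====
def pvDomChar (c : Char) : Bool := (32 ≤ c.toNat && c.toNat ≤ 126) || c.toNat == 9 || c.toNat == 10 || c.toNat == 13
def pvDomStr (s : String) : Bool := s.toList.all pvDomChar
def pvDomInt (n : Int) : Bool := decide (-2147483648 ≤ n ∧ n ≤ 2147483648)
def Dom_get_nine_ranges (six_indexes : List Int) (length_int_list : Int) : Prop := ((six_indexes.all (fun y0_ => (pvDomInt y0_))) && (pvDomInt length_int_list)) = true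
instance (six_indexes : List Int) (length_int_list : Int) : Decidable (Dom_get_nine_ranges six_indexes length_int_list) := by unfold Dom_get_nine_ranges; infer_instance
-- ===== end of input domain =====

-- B replaces A's forward loop with lookahead branch by a reversed traversal carrying the upper boundary as an accumulator (objective: alternative).


-- ===== PORT A =====
-- literal port of A: for-loop over enumerate, lookahead branch, append to result.
-- The index six_indexes[i+1] is guarded by i+1 < len, so pyGet? is always some; .getD 0 is exact.
def get_nine_ranges (six_indexes : List Int) (length_int_list : Int) : List (Int × (Int × Int)) :=
  (PySem.List.enumerate six_indexes).foldl
    (fun result p =>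
      let tup :=
        if p.1 + 1 < (six_indexes.length : Int) then
          (p.2, (p.2 + 1, (PySem.List.pyGet? six_indexes (p.1 + 1)).getD 0 - 1))
        else
          (p.2, (p.2 + 1, length_int_list - 1))
      result ++ [tup]) []

-- ===== PORT B =====
-- port of B: fold over the reversed list with state (result, bound), then reverse the result.
def get_nine_ranges_alt (six_indexes : List Int) (length_int_list : Int) : List (Int × (Int × Int)) :=
  let st := six_indexes.reverse.foldl
    (fun (st : List (Int × (Int × Int)) × Int) s =>
      (st.1 ++ [(s, (s + 1, st.2 - 1))], s))
    ([], length_int_list)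
  st.1.reverse

-- ===== PRECONDITION & SPEC =====
def Spec_get_nine_ranges (six_indexes : List Int) (length_int_list : Int) (out : List (Int × (Int × Int))) : Prop := out = get_nine_ranges_alt six_indexes length_int_list
instance (six_indexes : List Int) (length_int_list : Int) (out : List (Int × (Int × Int))) : Decidable (Spec_get_nine_ranges six_indexes length_int_list out) := by unfold Spec_get_nine_ranges; infer_instance

-- ===== CLAIM =====
def Claim_equal_get_nine_ranges : Prop := ∀ (six_indexes : List Int) (length_int_list : Int), Dom_get_nine_ranges six_indexes length_int_list → Spec_get_nine_ranges six_indexes length_int_list (get_nine_ranges six_indexes length_int_list)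

-- ===== LEMMAS AND PROOFS =====

-- common reference form: zip each six index with its successor (length as sentinel)
def pvZipForm (six : List Int) (L : Int) : List (Int × (Int × Int)) :=
  (six.zip (six.tail ++ [L])).map (fun sb => (sb.1, (sb.1 + 1, sb.2 - 1)))

lemma pvZipForm_cons (s : Int) (rest : List Int) (L : Int) :
    pvZipForm (s :: rest) L = (s, (s + 1, rest.headD L - 1)) :: pvZipForm rest L := by
  cases rest <;> simp [pvZipForm]

lemma a_eq_zipform (six : List Int) (L : Int) :
    get_nine_ranges six L = pvZipForm six L := by
  unfold get_nine_ranges pvZipForm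
  simp only [PySem.List.foldl_append_singleton_eq_map, List.nil_append]
  apply List.ext_getElem
  · cases six <;> simp [PySem.List.length_enumerate]
  · intro k h1 h2
    simp [PySem.List.getElem_enumerate]
    simp only [List.length_map, List.length_zip] at h1
    by_cases hk : k + 1 < six.length
    · rw [if_pos (by exact_mod_cast hk)]
      have ht : k < six.tail.length := by simp [List.length_tail]; omega
      rw [List.getElem_append_left ht, List.getElem_tail]
      have : (↑k + 1 : Int) = ((k + 1 : Nat) : Int) := by push_cast; ring
      rw [this, PySem.List.pyGet?_natCast, List.getElem?_eq_getElem hk]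
      rfl
    · rw [if_neg (by exact_mod_cast hk)]
      have hlen : k = six.tail.length := by simp [List.length_tail] at *; omega
      rw [List.getElem_append_right (by omega)]
      simp [hlen]

lemma b_foldr (six : List Int) (L : Int) :
    six.foldr (fun s st => (st.1 ++ [(s, (s + 1, st.2 - 1))], s))
      (([] : List (Int × (Int × Int))), L)
      = ((pvZipForm six L).reverse, six.headD L) := by
  induction six with
  | nil => simp [pvZipForm]
  | cons s rest ih =>
    simp only [List.foldr_cons, ih, pvZipForm_cons, List.reverse_cons]
    rfl

lemma b_eq_zipform (six : List Int) (L : Int) :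
    get_nine_ranges_alt six L = pvZipForm six L := by
  unfold get_nine_ranges_alt
  rw [List.foldl_reverse, b_foldr]
  simp

-- ===== VERDICT =====
theorem get_nine_ranges_spec : Claim_equal_get_nine_ranges := by
  intro six L _
  unfold Spec_get_nine_ranges
  rw [a_eq_zipform, b_eq_zipform]
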